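-- pv_equiv track=rewrite | github.com/xiaobingling93-pixel/Ascend-msinsight | scripts/ftrace_tools/trace_record.py | cpus_to_cpumask
-- ===== SOURCE A (Python) =====
-- def cpus_to_cpumask(cpus):
--     # 确保输入合法
--     for cpu in cpus:
--         if not isinstance(cpu, int) or cpu < 0:
--             raise ValueError(f"Invalid CPU ID: {cpu}")
--
--     # 构建位掩码（支持任意大小）
--     mask = 0
--     for cpu in cpus:
--         mask |= (1 << cpu)
--     if mask == 0:
--         return "0"
--     # 每 32 位一组，生成掩码字符串
--     parts = []
--     while mask:
--         # 取低 32 位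
--         part = mask & 0xFFFFFFFF
--         parts.append(f"{part:08x}")  # 8位十六进制，左补0
--         mask >>= 32
--     # 如果为空，说明 mask 为 0
--     if not parts:
--         return "0"
--     # 反转顺序（低位在右，高位在左），用逗号连接
--     cpumask_str = ",".join(reversed(parts))
--     return cpumask_str
-- ===== SOURCE B (Python) =====
-- def cpus_to_cpumask(cpus):
--     for cpu in cpus:
--         if not isinstance(cpu, int) or cpu < 0:
--             raise ValueError(f"Invalid CPU ID: {cpu}")
--     words = {}
--     max_idx = -1
--     for cpu in cpus:
--         idx, off = divmod(cpu, 32)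
--         words[idx] = words.get(idx, 0) | (1 << off)
--         max_idx = max(max_idx, idx)
--     if max_idx < 0:
--         return "0"
--     return ",".join(f"{words.get(i, 0):08x}" for i in reversed(range(max_idx + 1)))
-- ===== Notes on version B (the rewrite author's own statement) =====
-- stated objective: alternative
-- what changed: Replaces A's single big-integer bitmask (built with 1<<cpu and then peeled 32 bits at a time in a while loop) by a one-pass dict of 32-bit words indexed by cpu//32 plus a tracked max index, joined from the max word down with zero-filled gaps.
import Mathlib
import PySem

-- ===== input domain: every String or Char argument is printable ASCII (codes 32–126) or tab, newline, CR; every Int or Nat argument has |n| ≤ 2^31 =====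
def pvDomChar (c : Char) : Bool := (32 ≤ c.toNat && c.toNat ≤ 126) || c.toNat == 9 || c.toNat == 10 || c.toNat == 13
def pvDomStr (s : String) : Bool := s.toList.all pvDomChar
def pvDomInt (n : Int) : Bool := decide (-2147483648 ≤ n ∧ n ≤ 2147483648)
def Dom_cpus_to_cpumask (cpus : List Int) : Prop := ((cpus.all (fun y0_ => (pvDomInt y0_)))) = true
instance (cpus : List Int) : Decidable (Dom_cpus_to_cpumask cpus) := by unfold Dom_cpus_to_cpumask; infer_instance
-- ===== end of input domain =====

-- B replaces A's big-integer mask (build one huge int, then peel 32-bit chunks in a while loop)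
-- by a one-pass dict of 32-bit words indexed by cpu//32, joined from the max index down (objective: alternative).

-- shared formatting helper = Python's f"{part:08x}" (exact for part < 2^32: at most 8 lowercase hex digits, left-padded with '0')
def hex8 (n : Nat) : String :=
  let s := Nat.toDigits 16 n
  String.ofList (List.replicate (8 - s.length) '0' ++ s)

-- ===== PORT A =====
-- A's while loop: mask & 0xFFFFFFFF = mask % 2^32 and mask >>= 32 = mask / 2^32, exact on Nat (mask ≥ 0)
def pvPartsA (mask : Nat) : List String :=
  if h : mask = 0 then []
  else hex8 (mask % 2 ^ 32) :: pvPartsA (mask / 2 ^ 32)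
decreasing_by exact Nat.div_lt_self (Nat.pos_of_ne_zero h) (by norm_num)

-- the ValueError raised on a negative cpu is modeled as "" (those inputs are outside Pre_)
def cpus_to_cpumask (cpus : List Int) : String :=
  if cpus.any (fun c => decide (c < 0)) then ""
  else
    let mask : Nat := cpus.foldl (fun m c => m ||| (1 <<< c.toNat)) 0
    if mask = 0 then "0"
    else String.intercalate "," (pvPartsA mask).reverse

-- ===== PORT B =====
-- same validation loop (ValueError modeled as "", outside Pre_); then one fold building
-- (words dict, max_idx); divmod(cpu, 32) = (cpu.toNat / 32, cpu.toNat % 32), exact for cpu ≥ 0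
def cpus_to_cpumask_alt (cpus : List Int) : String :=
  if cpus.any (fun c => decide (c < 0)) then ""
  else
    let st := cpus.foldl
      (fun (st : PySem.Dict Nat Nat × Int) c =>
        let idx := c.toNat / 32
        let off := c.toNat % 32
        (st.1.insert idx (st.1.getD idx 0 ||| (1 <<< off)), max st.2 (idx : Int)))
      (PySem.Dict.empty, -1)
    if st.2 < 0 then "0"
    else String.intercalate ","
      (((List.range (st.2.toNat + 1)).reverse).map (fun i => hex8 (st.1.getD i 0)))

-- ===== PRECONDITION & SPEC =====
-- Pre_ excludes exactly the inputs on which A raises ValueError (some cpu < 0)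
def Pre_cpus_to_cpumask (cpus : List Int) : Prop := ∀ c ∈ cpus, 0 ≤ c
instance (cpus : List Int) : Decidable (Pre_cpus_to_cpumask cpus) := by
  unfold Pre_cpus_to_cpumask; infer_instance

def pvWitness_cpus_to_cpumask : List Int := [0, 33, 70]

def Spec_cpus_to_cpumask (cpus : List Int) (out : String) : Prop := out = cpus_to_cpumask_alt cpus
instance (cpus : List Int) (out : String) : Decidable (Spec_cpus_to_cpumask cpus out) := by
  unfold Spec_cpus_to_cpumask; infer_instance

-- ===== CLAIM (what is proved, stated in full; the proofs are below) =====
def Claim_equal_cpus_to_cpumask : Prop := ∀ (cpus : List Int), Dom_cpus_to_cpumask cpus → Pre_cpus_to_cpumask cpus → Spec_cpus_to_cpumask cpus (cpus_to_cpumask cpus)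

-- ===== LEMMAS AND PROOFS =====

-- proof-side views of the two folds
def orAll : List Int → Nat
  | [] => 0
  | c :: t => (1 <<< c.toNat) ||| orAll t

def orWord : List Int → Nat → Nat
  | [], _ => 0
  | c :: t, i => (if c.toNat / 32 = i then 1 <<< (c.toNat % 32) else 0) ||| orWord t i

theorem foldl_or_eq_orAll (l : List Int) : ∀ a : Nat,
    l.foldl (fun m c => m ||| (1 <<< c.toNat)) a = a ||| orAll l := by
  induction l with
  | nil => intro a; simp [orAll]
  | cons c t ih =>
    intro a
    simp only [List.foldl_cons, ih, orAll]
    rw [Nat.or_assoc]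

-- digit extraction distributes over |||
theorem or_div_mod (a b k m : Nat) :
    (a ||| b) / 2 ^ k % 2 ^ m = (a / 2 ^ k % 2 ^ m) ||| (b / 2 ^ k % 2 ^ m) := by
  apply Nat.eq_of_testBit_eq
  intro i
  rw [← Nat.shiftRight_eq_div_pow, ← Nat.shiftRight_eq_div_pow, ← Nat.shiftRight_eq_div_pow]
  simp [Nat.testBit_mod_two_pow, Nat.testBit_shiftRight, Nat.testBit_or, Bool.and_or_distrib_left]

theorem single_word (n i : Nat) :
    (1 <<< n) / 2 ^ (32 * i) % 2 ^ 32 = if n / 32 = i then 1 <<< (n % 32) else 0 := by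
  rw [Nat.one_shiftLeft]
  by_cases h : n / 32 = i
  · have hle : 32 * i ≤ n := by omega
    have hlt : n - 32 * i < 32 := by omega
    rw [if_pos h, Nat.one_shiftLeft, Nat.pow_div hle (by norm_num)]
    have hmod : n - 32 * i = n % 32 := by omega
    rw [hmod, Nat.mod_eq_of_lt (Nat.pow_lt_pow_right (by norm_num) (by omega))]
  · rw [if_neg h]
    rcases Nat.lt_or_ge n (32 * i) with hlo | hhi
    · rw [Nat.div_eq_of_lt (Nat.pow_lt_pow_right (by norm_num) hlo)]
      simp
    · have hge : 32 * i ≤ n := hhi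
      rw [Nat.pow_div hge (by norm_num)]
      have h32 : 32 ≤ n - 32 * i := by omega
      have : 2 ^ (n - 32 * i) = 2 ^ 32 * 2 ^ (n - 32 * i - 32) := by
        rw [← pow_add]; congr 1; omega
      rw [this, Nat.mul_mod_right]

theorem orAll_word (l : List Int) (i : Nat) :
    orAll l / 2 ^ (32 * i) % 2 ^ 32 = orWord l i := by
  induction l with
  | nil => simp [orAll, orWord]
  | cons c t ih => rw [orAll, orWord, or_div_mod, single_word, ih]

-- B's fold: the dict component
theorem dictFold_getD (l : List Int) : ∀ (d : PySem.Dict Nat Nat) (j : Int) (i : Nat),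
    ((l.foldl
      (fun (st : PySem.Dict Nat Nat × Int) c =>
        (st.1.insert (c.toNat / 32) (st.1.getD (c.toNat / 32) 0 ||| (1 <<< (c.toNat % 32))),
         max st.2 ((c.toNat / 32 : Nat) : Int)))
      (d, j)).1).getD i 0 = d.getD i 0 ||| orWord l i := by
  induction l with
  | nil => intro d j i; simp [orWord]
  | cons c t ih =>
    intro d j i
    rw [List.foldl_cons, ih, orWord, PySem.Dict.getD_insert]
    by_cases h : i = c.toNat / 32
    · rw [if_pos h, if_pos h.symm, Nat.or_assoc]; subst h; rfl
    · rw [if_neg h, if_neg (fun hh => h hh.symm), Nat.zero_or]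

-- B's fold: the max component
theorem dictFold_snd (l : List Int) : ∀ (d : PySem.Dict Nat Nat) (j : Int),
    ((l.foldl
      (fun (st : PySem.Dict Nat Nat × Int) c =>
        (st.1.insert (c.toNat / 32) (st.1.getD (c.toNat / 32) 0 ||| (1 <<< (c.toNat % 32))),
         max st.2 ((c.toNat / 32 : Nat) : Int)))
      (d, j)).2) = l.foldl (fun a c => max a ((c.toNat / 32 : Nat) : Int)) j := by
  induction l with
  | nil => intro d j; rfl
  | cons c t ih => intro d j; rw [List.foldl_cons, ih, List.foldl_cons]

def fmax (l : List Int) (j : Int) : Int := l.foldl (fun a c => max a ((c.toNat / 32 : Nat) : Int)) j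

theorem fmax_le_init (l : List Int) : ∀ j : Int, j ≤ fmax l j := by
  induction l with
  | nil => intro j; exact le_refl j
  | cons c t ih =>
    intro j
    exact le_trans (le_max_left _ _) (ih _)

theorem fmax_ge_mem (l : List Int) : ∀ j : Int, ∀ c ∈ l, ((c.toNat / 32 : Nat) : Int) ≤ fmax l j := by
  induction l with
  | nil => intro j c hc; cases hc
  | cons a t ih =>
    intro j c hc
    rcases List.mem_cons.mp hc with rfl | hc
    · exact le_trans (le_max_right _ _) (fmax_le_init t _)
    · exact ih _ c hc

theorem fmax_cases (l : List Int) : ∀ j : Int,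
    fmax l j = j ∨ ∃ c ∈ l, fmax l j = ((c.toNat / 32 : Nat) : Int) := by
  induction l with
  | nil => intro j; exact Or.inl rfl
  | cons a t ih =>
    intro j
    rcases ih (max j ((a.toNat / 32 : Nat) : Int)) with h | ⟨c, hc, h⟩
    · rcases max_cases j ((a.toNat / 32 : Nat) : Int) with ⟨hm, _⟩ | ⟨hm, _⟩
      · exact Or.inl (by rw [fmax, List.foldl_cons, ← fmax] at *; rw [h, hm])
      · exact Or.inr ⟨a, List.mem_cons_self, by rw [fmax, List.foldl_cons, ← fmax] at *; rw [h, hm]⟩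
    · exact Or.inr ⟨c, List.mem_cons_of_mem _ hc, by rw [fmax, List.foldl_cons, ← fmax] at *; exact h⟩

theorem le_orAll (l : List Int) : ∀ c ∈ l, (1 <<< c.toNat) ≤ orAll l := by
  induction l with
  | nil => intro c hc; cases hc
  | cons a t ih =>
    intro c hc
    rcases List.mem_cons.mp hc with rfl | hc
    · exact Nat.left_le_or
    · exact le_trans (ih c hc) (by rw [orAll, Nat.or_comm]; exact Nat.left_le_or)

theorem orAll_lt (l : List Int) (n : Nat) (h : ∀ c ∈ l, c.toNat < n) : orAll l < 2 ^ n := by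
  induction l with
  | nil => exact Nat.two_pow_pos n
  | cons a t ih =>
    rw [orAll, Nat.one_shiftLeft]
    exact Nat.or_lt_two_pow (Nat.pow_lt_pow_right (by norm_num) (h a List.mem_cons_self))
      (ih (fun c hc => h c (List.mem_cons_of_mem _ hc)))

theorem pvPartsA_unfold (mask : Nat) :
    pvPartsA mask = if mask = 0 then [] else hex8 (mask % 2 ^ 32) :: pvPartsA (mask / 2 ^ 32) := by
  rw [pvPartsA]
  split <;> rfl

-- A's chunking loop, characterised on an interval of widths
theorem partsA_eq : ∀ (n mask : Nat), 2 ^ (32 * n) ≤ mask → mask < 2 ^ (32 * (n + 1)) →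
    pvPartsA mask = (List.range (n + 1)).map (fun i => hex8 (mask / 2 ^ (32 * i) % 2 ^ 32)) := by
  intro n
  induction n with
  | zero =>
    intro mask hlo hhi
    have h0 : mask ≠ 0 := by
      have h1 : (0:Nat) < 2 ^ (32 * 0) := Nat.two_pow_pos _
      omega
    rw [pvPartsA_unfold, if_neg h0]
    have hdiv : mask / 2 ^ 32 = 0 := Nat.div_eq_of_lt (by simpa using hhi)
    rw [hdiv, pvPartsA_unfold, if_pos rfl]
    have hr1 : List.range (0 + 1) = [0] := rfl
    rw [hr1, List.map_cons, List.map_nil, Nat.mul_zero, pow_zero, Nat.div_one]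
  | succ n ih =>
    intro mask hlo hhi
    have h0 : mask ≠ 0 := by
      have : 0 < 2 ^ (32 * (n + 1)) := by positivity
      omega
    rw [pvPartsA_unfold, if_neg h0]
    have hlo' : 2 ^ (32 * n) ≤ mask / 2 ^ 32 := by
      rw [Nat.le_div_iff_mul_le (by norm_num)]
      calc 2 ^ (32 * n) * 2 ^ 32 = 2 ^ (32 * (n + 1)) := by rw [← pow_add]; ring_nf
        _ ≤ mask := hlo
    have hhi' : mask / 2 ^ 32 < 2 ^ (32 * (n + 1)) := by
      rw [Nat.div_lt_iff_lt_mul (by norm_num)]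
      calc mask < 2 ^ (32 * (n + 2)) := hhi
        _ = 2 ^ (32 * (n + 1)) * 2 ^ 32 := by rw [← pow_add]; ring_nf
    have hr : List.map (fun i => hex8 (mask / 2 ^ (32 * i) % 2 ^ 32)) (List.range (n + 1 + 1)) =
        hex8 (mask % 2 ^ 32) ::
          List.map (fun i => hex8 (mask / 2 ^ 32 / 2 ^ (32 * i) % 2 ^ 32)) (List.range (n + 1)) := by
      rw [List.range_succ_eq_map, List.map_cons, List.map_map]
      congr 1
      · rw [Nat.mul_zero, pow_zero, Nat.div_one]
      · apply List.map_congr_left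
        intro i _
        simp only [Function.comp_apply, Nat.succ_eq_add_one]
        have hexp : (32:Nat) + 32 * i = 32 * (i + 1) := by ring
        rw [Nat.div_div_eq_div_mul, ← pow_add, hexp]
    rw [ih _ hlo' hhi', hr]

-- main agreement on nonempty valid input
theorem main_nonempty (cpus : List Int) (hne : cpus ≠ []) (hpre : ∀ c ∈ cpus, 0 ≤ c) :
    cpus_to_cpumask cpus = cpus_to_cpumask_alt cpus := by
  have hany : cpus.any (fun c => decide (c < 0)) = false := by
    simp only [List.any_eq_false, decide_eq_true_eq]
    intro c hc
    exact not_lt.mpr (hpre c hc)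
  have hc : (cpus.any fun c => decide (c < 0)) ≠ true := by simp [hany]
  -- extremal word index
  obtain ⟨c0, hc0⟩ := List.exists_mem_of_ne_nil cpus hne
  have hfmax_nonneg : 0 ≤ fmax cpus (-1) :=
    le_trans (Int.natCast_nonneg _) (fmax_ge_mem cpus (-1) c0 hc0)
  obtain ⟨cm, hcm, hcmv⟩ : ∃ c ∈ cpus, fmax cpus (-1) = ((c.toNat / 32 : Nat) : Int) := by
    rcases fmax_cases cpus (-1) with h | h
    · omega
    · exact h
  set m : Nat := (fmax cpus (-1)).toNat with hm
  have hmv : cm.toNat / 32 = m := by omega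
  have hub : ∀ c ∈ cpus, c.toNat / 32 ≤ m := by
    intro c hc'
    have := fmax_ge_mem cpus (-1) c hc'
    omega
  -- mask bounds
  have hmask_lt : orAll cpus < 2 ^ (32 * (m + 1)) := by
    apply orAll_lt
    intro c hc'
    have := hub c hc'
    have := Nat.div_add_mod c.toNat 32
    have := Nat.mod_lt c.toNat (show 0 < 32 by norm_num)
    omega
  have hmask_ge : 2 ^ (32 * m) ≤ orAll cpus := by
    calc 2 ^ (32 * m) ≤ 2 ^ cm.toNat := by
          apply Nat.pow_le_pow_right (by norm_num)
          have := Nat.div_add_mod cm.toNat 32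
          omega
      _ = 1 <<< cm.toNat := (Nat.one_shiftLeft _).symm
      _ ≤ orAll cpus := le_orAll cpus cm hcm
  have hmask_ne : orAll cpus ≠ 0 := by
    have : 0 < 2 ^ (32 * m) := Nat.two_pow_pos _
    omega
  have hsnd : fmax cpus (-1) = ((m : Nat) : Int) := by omega
  -- unfold both ports past the validation branch
  rw [cpus_to_cpumask, cpus_to_cpumask_alt, if_neg hc, if_neg hc]
  simp only [foldl_or_eq_orAll, Nat.zero_or, dictFold_snd]
  rw [if_neg hmask_ne]
  rw [show cpus.foldl (fun a c => max a ((c.toNat / 32 : Nat) : Int)) (-1) = fmax cpus (-1) from rfl,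
      hsnd]
  rw [if_neg (not_lt.mpr (Int.natCast_nonneg m))]
  -- both sides intercalate the same list
  congr 1
  rw [Int.toNat_natCast]
  rw [partsA_eq m (orAll cpus) hmask_ge hmask_lt]
  rw [← List.map_reverse]
  apply List.map_congr_left
  intro i _
  rw [dictFold_getD, PySem.Dict.getD_empty, Nat.zero_or, orAll_word]

-- ===== VERDICT (by name: the statement is the Claim_ definition above) =====
theorem cpus_to_cpumask_spec : Claim_equal_cpus_to_cpumask := by
  intro cpus _ hpre
  unfold Spec_cpus_to_cpumask
  rcases eq_or_ne cpus [] with rfl | hne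
  · rfl
  · exact main_nonempty cpus hne hpre
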